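-- pv_equiv track=rewrite | github.com/Dustin-08/New_Baekjoon_Starting_in_2025 | 00_ETC_PY/9095.py | dp
-- ===== SOURCE A (Python) =====
-- def dp(n):
--     arr = [0] * (n + 1)
--     arr[1] = 1
--     if n >= 2:
--         arr[2] = 2
--     if n >= 3:
--         arr[3] = 4
--
--     for i in range(4, n + 1):
--         arr[i] = arr[i - 1] + arr[i - 2] + arr[i - 3]
--
--     return arr[n]
-- ===== SOURCE B (Python) =====
-- def dp(n):
--     # O(log n) matrix exponentiation of the 3x3 tribonacci transition matrix.
--     def mat_mul(X, Y):
--         return [[sum(X[i][k] * Y[k][j] for k in range(3)) for j in range(3)]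
--                 for i in range(3)]
--
--     def mat_pow(M, e):
--         if e == 0:
--             return [[1, 0, 0], [0, 1, 0], [0, 0, 1]]
--         H = mat_pow(M, e // 2)
--         H2 = mat_mul(H, H)
--         return mat_mul(H2, M) if e % 2 else H2
--
--     if n == 1:
--         return 1
--     if n == 2:
--         return 2
--     if n == 3:
--         return 4
--     P = mat_pow([[1, 1, 1], [1, 0, 0], [0, 1, 0]], n - 3)
--     return P[0][0] * 4 + P[0][1] * 2 + P[0][2] * 1
-- ===== Notes on version B (the rewrite author's own statement) =====
-- stated objective: faster
-- what changed: Replaced the O(n) DP array fill with O(log n) binary exponentiation of the 3x3 tribonacci transition matrix.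
import Mathlib
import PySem

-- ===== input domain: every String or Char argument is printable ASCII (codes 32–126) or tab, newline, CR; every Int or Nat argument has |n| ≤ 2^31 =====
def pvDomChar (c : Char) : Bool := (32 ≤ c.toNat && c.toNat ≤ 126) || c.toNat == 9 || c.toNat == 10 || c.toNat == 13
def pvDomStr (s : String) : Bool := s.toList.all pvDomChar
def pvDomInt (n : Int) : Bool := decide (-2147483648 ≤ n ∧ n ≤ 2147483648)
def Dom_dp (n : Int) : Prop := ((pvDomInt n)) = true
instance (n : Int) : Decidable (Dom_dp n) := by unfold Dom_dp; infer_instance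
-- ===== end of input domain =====

-- B replaces A's O(n) DP array with O(log n) binary exponentiation of the 3x3 tribonacci transition matrix.

-- ===== PORT A =====
def dp (n : Int) : Int :=
  let arr : List Int := List.replicate (n + 1).toNat 0
  let arr := PySem.List.pySetD arr 1 1
  let arr := if n ≥ 2 then PySem.List.pySetD arr 2 2 else arr
  let arr := if n ≥ 3 then PySem.List.pySetD arr 3 4 else arr
  let arr := (PySem.List.pyRange 4 (n + 1) 1).foldl
    (fun a i => PySem.List.pySetD a i
      (PySem.List.pyGetD a (i - 1) 0 + PySem.List.pyGetD a (i - 2) 0 + PySem.List.pyGetD a (i - 3) 0)) arr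
  PySem.List.pyGetD arr n 0

-- ===== PORT B =====
structure M3 where
  a : Int
  b : Int
  c : Int
  d : Int
  e : Int
  f : Int
  g : Int
  h : Int
  i : Int
deriving DecidableEq, Repr

def m3mul (X Y : M3) : M3 :=
  ⟨X.a*Y.a + X.b*Y.d + X.c*Y.g, X.a*Y.b + X.b*Y.e + X.c*Y.h, X.a*Y.c + X.b*Y.f + X.c*Y.i,
   X.d*Y.a + X.e*Y.d + X.f*Y.g, X.d*Y.b + X.e*Y.e + X.f*Y.h, X.d*Y.c + X.e*Y.f + X.f*Y.i,
   X.g*Y.a + X.h*Y.d + X.i*Y.g, X.g*Y.b + X.h*Y.e + X.i*Y.h, X.g*Y.c + X.h*Y.f + X.i*Y.i⟩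

def m3id : M3 := ⟨1,0,0,0,1,0,0,0,1⟩

def m3pow (M : M3) (e : Nat) : M3 :=
  if he : e = 0 then m3id
  else
    let H := m3pow M (e / 2)
    let H2 := m3mul H H
    if e % 2 = 1 then m3mul H2 M else H2
termination_by e
decreasing_by exact Nat.div_lt_self (Nat.pos_of_ne_zero he) (by norm_num)

def tribMat : M3 := ⟨1,1,1,1,0,0,0,1,0⟩

def dp_alt (n : Int) : Int :=
  if n = 1 then 1
  else if n = 2 then 2
  else if n = 3 then 4
  else
    let P := m3pow tribMat (n - 3).toNat
    P.a * 4 + P.b * 2 + P.c * 1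

-- ===== PRECONDITION & SPEC =====
-- Pre_: A raises IndexError for every n ≤ 0 (the DP array is too short for arr[1] = 1).
def Pre_dp (n : Int) : Prop := 1 ≤ n
instance (n : Int) : Decidable (Pre_dp n) := by unfold Pre_dp; infer_instance
def pvWitness_dp : Int := 5

def Spec_dp (n : Int) (out : Int) : Prop := out = dp_alt n
instance (n : Int) (out : Int) : Decidable (Spec_dp n out) := by unfold Spec_dp; infer_instance

-- ===== CLAIM (what is proved, stated in full; the proofs are below) =====
def Claim_equal_dp : Prop := ∀ (n : Int), Dom_dp n → Pre_dp n → Spec_dp n (dp n)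

-- ===== LEMMAS AND PROOFS =====

-- the tribonacci sequence both programs compute
def trib : Nat → Int
  | 0 => 0
  | 1 => 1
  | 2 => 2
  | 3 => 4
  | (k+4) => trib (k+3) + trib (k+2) + trib (k+1)

theorem trib_step (m : Nat) (hm : 3 ≤ m) :
    trib (m + 1) = trib m + trib (m - 1) + trib (m - 2) := by
  obtain ⟨k, rfl⟩ : ∃ k, m = k + 3 := ⟨m - 3, by omega⟩
  show trib (k + 4) = trib (k + 3) + trib (k + 2) + trib (k + 1)
  simp [trib]

-- A side -------------------------------------------------------------

-- array state characterization, after processing range(4, m+1)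
def arrState (N m : Nat) : List Int :=
  (List.range N).map (fun k => if k ≤ m then trib k else 0)

theorem dp_init (n : Int) (hn : 1 ≤ n) :
    (if n ≥ 3 then PySem.List.pySetD
        (if n ≥ 2 then PySem.List.pySetD (PySem.List.pySetD (List.replicate (n+1).toNat (0:Int)) 1 1) 2 2
         else PySem.List.pySetD (List.replicate (n+1).toNat (0:Int)) 1 1) 3 4
     else (if n ≥ 2 then PySem.List.pySetD (PySem.List.pySetD (List.replicate (n+1).toNat (0:Int)) 1 1) 2 2
         else PySem.List.pySetD (List.replicate (n+1).toNat (0:Int)) 1 1))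
    = arrState (n+1).toNat 3 := by
  have hset : ∀ (xs : List Int) (j : Nat) (v : Int),
      PySem.List.pySetD xs (j : Int) v = xs.set j v := by
    intro xs j v; simp [PySem.List.pySetD_of_nonneg]
  by_cases h3 : n ≥ 3
  · simp only [h3, if_pos, if_pos (by omega : n ≥ 2)]
    rw [show (1:Int) = ((1:Nat):Int) from rfl, show (2:Int) = ((2:Nat):Int) from rfl,
      show (3:Int) = ((3:Nat):Int) from rfl, hset, hset, hset]
    apply List.ext_getElem
    · simp [arrState]
    · intro k hk1 hk2
      simp only [List.getElem_set, List.getElem_replicate, arrState, List.getElem_map,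
        List.getElem_range]
      rcases k with _|_|_|_|k <;> simp [trib]
  · by_cases h2 : n ≥ 2
    · simp only [h3, if_pos h2, if_false]
      rw [show (1:Int) = ((1:Nat):Int) from rfl, show (2:Int) = ((2:Nat):Int) from rfl, hset, hset]
      apply List.ext_getElem
      · simp [arrState]
      · intro k hk1 hk2
        simp only [List.getElem_set, List.getElem_replicate, arrState, List.getElem_map,
          List.getElem_range]
        rcases k with _|_|_|_|k <;> simp_all [trib, arrState] <;> omega
    · simp only [h3, h2, if_false]
      rw [show (1:Int) = ((1:Nat):Int) from rfl, hset]
      apply List.ext_getElem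
      · simp [arrState]
      · intro k hk1 hk2
        simp only [List.getElem_set, List.getElem_replicate, arrState, List.getElem_map,
          List.getElem_range]
        rcases k with _|_|_|_|k <;> simp_all [trib, arrState] <;> omega

theorem dp_loop (n : Int) (hn : 1 ≤ n) (m : Nat) (hm3 : 3 ≤ m) (hmn : (m : Int) ≤ n) :
    (PySem.List.pyRange 4 ((m : Int) + 1) 1).foldl
      (fun a i => PySem.List.pySetD a i
        (PySem.List.pyGetD a (i - 1) 0 + PySem.List.pyGetD a (i - 2) 0 + PySem.List.pyGetD a (i - 3) 0))
      (arrState (n+1).toNat 3)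
    = arrState (n+1).toNat m := by
  induction m with
  | zero => omega
  | succ m ih =>
    by_cases hm : 3 ≤ m
    · -- range(4, m+2) = range(4, m+1) ++ [m+1]
      have hsplit : PySem.List.pyRange 4 ((m:Int) + 1 + 1) 1
          = PySem.List.pyRange 4 ((m:Int) + 1) 1 ++ [(m:Int) + 1] :=
        PySem.List.pyRange_one_succ_right (by omega)
      have hc : ((m:Int) + 1 + 1) = (((m+1 : Nat) : Int) + 1) := by push_cast; ring
      rw [← hc, hsplit, List.foldl_append, ih hm (by push_cast at hmn; omega)]
      -- one update step
      have hN : m + 1 < (n+1).toNat := by omega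
      have hlen : (arrState (n+1).toNat m).length = (n+1).toNat := by
        simp [arrState]
      -- index casts
      have e1 : ((m:Int) + 1) = ((m+1 : Nat) : Int) := by push_cast; ring
      have e2 : (((m+1 : Nat) : Int) - 1) = ((m : Nat) : Int) := by push_cast; ring
      have e3 : (((m+1 : Nat) : Int) - 2) = ((m - 1 : Nat) : Int) := by push_cast; omega
      have e4 : (((m+1 : Nat) : Int) - 3) = ((m - 2 : Nat) : Int) := by push_cast; omega
      simp only [List.foldl_cons, List.foldl_nil, e1]
      simp only [e2, e3, e4, PySem.List.pyGetD_natCast, PySem.List.pySetD_natCast]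
      have hget : ∀ j : Nat, j < (n+1).toNat →
          (arrState (n+1).toNat m).getD j 0 = if j ≤ m then trib j else 0 := by
        intro j hj
        simp [arrState, List.getD_eq_getElem?_getD, hj]
      rw [hget m (by omega), hget (m-1) (by omega), hget (m-2) (by omega)]
      simp only [if_pos (le_refl m), if_pos (by omega : m - 1 ≤ m), if_pos (by omega : m - 2 ≤ m)]
      have hv : trib m + trib (m - 1) + trib (m - 2) = trib (m + 1) := (trib_step m hm).symm
      rw [hv]
      apply List.ext_getElem
      · simp [arrState]
      · intro k hk1 hk2
        have hkN : k < (n+1).toNat := by simpa [arrState] using hk1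
        simp only [arrState, List.getElem_set, List.getElem_map, List.getElem_range]
        by_cases he : m + 1 = k
        · subst he
          simp
        · simp only [if_neg he]
          by_cases hle : k ≤ m
          · rw [if_pos hle, if_pos (by omega : k ≤ m + 1)]
          · rw [if_neg hle, if_neg (by omega : ¬ k ≤ m + 1)]
    · -- m + 1 = 3 : base case, range(4, 4) is empty
      have hm1 : m + 1 = 3 := by omega
      have : PySem.List.pyRange 4 (((m+1:Nat):Int) + 1) 1 = [] := by
        apply PySem.List.pyRange_one_eq_nil; omega
      rw [this]
      simp only [List.foldl_nil]
      rw [hm1]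

theorem arrState_getD (N m : Nat) (i : Int) (h0 : 0 ≤ i) (hN : i < (N : Int)) (hm : i.toNat ≤ m) :
    PySem.List.pyGetD (arrState N m) i 0 = trib i.toNat := by
  obtain ⟨k, rfl⟩ : ∃ k : Nat, i = (k : Int) := ⟨i.toNat, by omega⟩
  have hk : k < N := by omega
  have hm' : k ≤ m := by simpa using hm
  simp [arrState, List.getD_eq_getElem?_getD, hk, hm']

theorem dpA (n : Int) (hn : 1 ≤ n) : dp n = trib n.toNat := by
  have hdp : dp n = PySem.List.pyGetD
      ((PySem.List.pyRange 4 (n + 1) 1).foldl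
        (fun a i => PySem.List.pySetD a i
          (PySem.List.pyGetD a (i - 1) 0 + PySem.List.pyGetD a (i - 2) 0 + PySem.List.pyGetD a (i - 3) 0))
        (if n ≥ 3 then PySem.List.pySetD
            (if n ≥ 2 then PySem.List.pySetD (PySem.List.pySetD (List.replicate (n+1).toNat (0:Int)) 1 1) 2 2
             else PySem.List.pySetD (List.replicate (n+1).toNat (0:Int)) 1 1) 3 4
         else (if n ≥ 2 then PySem.List.pySetD (PySem.List.pySetD (List.replicate (n+1).toNat (0:Int)) 1 1) 2 2
             else PySem.List.pySetD (List.replicate (n+1).toNat (0:Int)) 1 1))) n 0 := rfl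
  rw [hdp, dp_init n hn]
  by_cases h4 : 4 ≤ n
  · have hloop := dp_loop n hn n.toNat (by omega) (by omega)
    have hc : ((n.toNat : Int) + 1) = n + 1 := by omega
    rw [hc] at hloop
    rw [hloop, arrState_getD _ _ n (by omega) (by omega) (le_refl _)]
  · rw [PySem.List.pyRange_one_eq_nil (by omega : n + 1 ≤ 4)]
    simp only [List.foldl_nil]
    rw [arrState_getD _ _ n (by omega) (by omega) (by omega : n.toNat ≤ 3)]

-- B side -------------------------------------------------------------

def lpow : Nat → M3
  | 0 => m3id
  | (k+1) => m3mul tribMat (lpow k)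

theorem m3mul_assoc (X Y Z : M3) : m3mul (m3mul X Y) Z = m3mul X (m3mul Y Z) := by
  cases X; cases Y; cases Z
  simp only [m3mul, M3.mk.injEq]
  and_intros <;> ring

theorem m3mul_id_right (X : M3) : m3mul X m3id = X := by
  cases X; simp [m3mul, m3id]

theorem m3mul_id_left (X : M3) : m3mul m3id X = X := by
  cases X; simp [m3mul, m3id]

theorem lpow_add (a b : Nat) : lpow (a + b) = m3mul (lpow a) (lpow b) := by
  induction a with
  | zero => simp [lpow, m3mul_id_left]
  | succ a ih =>
    have : a + 1 + b = (a + b) + 1 := by omega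
    rw [this]
    show m3mul tribMat (lpow (a + b)) = _
    rw [ih]
    show _ = m3mul (m3mul tribMat (lpow a)) (lpow b)
    rw [m3mul_assoc]

theorem lpow_one : lpow 1 = tribMat := by
  show m3mul tribMat m3id = tribMat
  exact m3mul_id_right _

theorem m3pow_eq (e : Nat) : m3pow tribMat e = lpow e := by
  induction e using Nat.strong_induction_on with
  | _ e ih =>
    rw [m3pow]
    by_cases he : e = 0
    · simp [he, lpow]
    · simp only [he, dite_false]
      rw [ih (e / 2) (Nat.div_lt_self (Nat.pos_of_ne_zero he) (by norm_num))]
      by_cases hodd : e % 2 = 1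
      · simp only [hodd, reduceIte]
        rw [← lpow_one, ← lpow_add, ← lpow_add]
        congr 1; omega
      · simp only [hodd, reduceIte]
        rw [← lpow_add]
        congr 1; omega

def act3 (X : M3) : Int × Int × Int := (X.a*4 + X.b*2 + X.c*1, X.d*4 + X.e*2 + X.f*1, X.g*4 + X.h*2 + X.i*1)

theorem act3_step (P : M3) :
    act3 (m3mul tribMat P) = ((act3 P).1 + (act3 P).2.1 + (act3 P).2.2, (act3 P).1, (act3 P).2.1) := by
  cases P
  simp only [act3, m3mul, tribMat, Prod.mk.injEq]
  and_intros <;> ring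

theorem lpow_act (k : Nat) : act3 (lpow k) = (trib (k + 3), trib (k + 2), trib (k + 1)) := by
  induction k with
  | zero => simp [lpow, m3id, act3]; decide
  | succ k ih =>
    show act3 (m3mul tribMat (lpow k)) = _
    rw [act3_step, ih]
    simp only [Prod.mk.injEq]
    refine ⟨?_, trivial⟩
    show trib (k + 3) + trib (k + 2) + trib (k + 1) = trib (k + 4)
    simp [trib]

theorem dpB (n : Int) (hn : 1 ≤ n) : dp_alt n = trib n.toNat := by
  unfold dp_alt
  by_cases h1 : n = 1
  · simp [h1]; decide
  by_cases h2 : n = 2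
  · simp [h2]; decide
  by_cases h3 : n = 3
  · simp [h3]; decide
  · simp only [h1, h2, h3, if_false]
    have hk : (n - 3).toNat + 3 = n.toNat := by omega
    have := lpow_act (n - 3).toNat
    rw [hk] at this
    rw [m3pow_eq]
    have hfst : (act3 (lpow (n-3).toNat)).1 = trib n.toNat := by rw [this]
    simpa [act3] using hfst

-- ===== VERDICT (by name: the statement is the Claim_ definition above) =====
theorem dp_spec : Claim_equal_dp := by
  intro n _ hpre
  unfold Spec_dp
  rw [dpA n hpre, dpB n hpre]
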